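-- pv_equiv track=rewrite | github.com/mjenrungrot/autolab | src/autolab/runners.py | _is_within_scope
-- ===== SOURCE A (Python) =====
-- def _is_within_scope(path: str, allowed_roots: tuple[str, ...]) -> bool:
--     normalized = path.strip().replace("\\", "/")
--     if not normalized:
--         return True
--     for root in allowed_roots:
--         candidate = root.strip().strip("/")
--         if not candidate:
--             continue
--         if normalized == candidate or normalized.startswith(f"{candidate}/"):
--             return True
--     return False
-- ===== SOURCE B (Python) =====
-- def _is_within_scope(path: str, allowed_roots) -> bool:
--     normalized = path.strip().replace("\\", "/")
--     if not normalized: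
--         return True
--     roots = {c for c in (r.strip().strip("/") for r in allowed_roots) if c}
--     prefixes = [normalized] + [normalized[:i] for i, ch in enumerate(normalized) if ch == "/"]
--     for p in prefixes:
--         if p in roots:
--             return True
--     return False
-- ===== Notes on version B (the rewrite author's own statement) =====
-- stated objective: alternative
-- what changed: B inverts the traversal: instead of scanning each root and testing equality/startswith against the path, it builds a set of cleaned roots once and walks the path's ancestor prefixes (the whole normalized string and each slice before a '/'), returning True on the first prefix found in the set.
import Mathlib
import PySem

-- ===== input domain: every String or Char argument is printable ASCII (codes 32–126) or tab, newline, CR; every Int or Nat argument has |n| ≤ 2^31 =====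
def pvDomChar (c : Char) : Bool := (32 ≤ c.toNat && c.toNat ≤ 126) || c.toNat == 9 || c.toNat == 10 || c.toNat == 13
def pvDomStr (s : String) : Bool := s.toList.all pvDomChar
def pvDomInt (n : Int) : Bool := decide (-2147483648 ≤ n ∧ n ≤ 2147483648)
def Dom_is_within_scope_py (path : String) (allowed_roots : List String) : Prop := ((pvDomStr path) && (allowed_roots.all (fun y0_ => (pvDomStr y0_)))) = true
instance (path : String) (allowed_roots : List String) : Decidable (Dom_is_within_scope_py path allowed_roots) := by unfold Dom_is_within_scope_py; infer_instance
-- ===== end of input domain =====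

-- B replaces A's per-root startswith scan by one set of cleaned roots plus a walk over the
-- path's ancestor prefixes (alternative decomposition; same asymptotic cost).

-- ===== PORT A =====
-- candidate = root.strip().strip("/")  (shared cleaning step of both Pythons)
def pvCleanRoot (r : String) : List Char :=
  PySem.Chars.stripChars (PySem.Chars.strip r.toList) ['/']

-- the 'for root in allowed_roots' loop of A with its early return
def pvALoop (normalized : List Char) : List String → Bool
  | [] => false
  | root :: rest =>
    let candidate := pvCleanRoot root
    if candidate = [] then pvALoop normalized rest
    else if normalized = candidate ∨ PySem.Chars.startswith normalized (candidate ++ ['/']) = true then true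
    else pvALoop normalized rest

def is_within_scope_py (path : String) (allowed_roots : List String) : Bool :=
  let normalized := PySem.Chars.replace (PySem.Chars.strip path.toList) ['\\'] ['/']
  if normalized = [] then true
  else pvALoop normalized allowed_roots

-- ===== PORT B =====
-- the 'for p in prefixes' loop of B with its early return
def pvBLoop (roots : PySem.Set (List Char)) : List (List Char) → Bool
  | [] => false
  | p :: rest => if PySem.Set.contains roots p then true else pvBLoop roots rest

def is_within_scope_py_alt (path : String) (allowed_roots : List String) : Bool :=
  let normalized := PySem.Chars.replace (PySem.Chars.strip path.toList) ['\\'] ['/']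
  if normalized = [] then true
  else
    let roots : PySem.Set (List Char) :=
      PySem.Set.ofList ((allowed_roots.map (fun r => pvCleanRoot r)).filter (fun c => !c.isEmpty))
    let prefixes : List (List Char) :=
      normalized ::
        ((PySem.List.enumerate normalized 0).filter (fun p => p.2 == '/')).map
          (fun p => PySem.List.slice normalized none (some p.1))
    pvBLoop roots prefixes

-- ===== PRECONDITION & SPEC =====
def Spec_is_within_scope_py (path : String) (allowed_roots : List String) (out : Bool) : Prop := out = is_within_scope_py_alt path allowed_roots
instance (path : String) (allowed_roots : List String) (out : Bool) : Decidable (Spec_is_within_scope_py path allowed_roots out) := by unfold Spec_is_within_scope_py; infer_instance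

-- ===== CLAIM (what is proved, stated in full; the proofs are below) =====
def Claim_equal_is_within_scope_py : Prop := ∀ (path : String) (allowed_roots : List String), Dom_is_within_scope_py path allowed_roots → Spec_is_within_scope_py path allowed_roots (is_within_scope_py path allowed_roots)

-- ===== LEMMAS AND PROOFS =====

theorem pvALoop_eq_any (n : List Char) (rs : List String) :
    pvALoop n rs = rs.any (fun r =>
      !(pvCleanRoot r == []) &&
        (n == pvCleanRoot r || PySem.Chars.startswith n (pvCleanRoot r ++ ['/']))) := by
  induction rs with
  | nil => rfl
  | cons root rest ih =>
    simp only [pvALoop, List.any_cons]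
    split_ifs with h1 h2
    · simp [h1, ih]
    · rcases h2 with h2 | h2 <;> simp [h1, h2]
    · push Not at h2
      simp [h1, h2.1, h2.2, ih]

theorem pvBLoop_eq_any (roots : PySem.Set (List Char)) (ps : List (List Char)) :
    pvBLoop roots ps = ps.any (fun p => PySem.Set.contains roots p) := by
  induction ps with
  | nil => rfl
  | cons p rest ih =>
    simp only [pvBLoop, List.any_cons]
    split_ifs with h <;> simp only [PySem.Set.contains_iff] at h <;> simp [h, ih]

-- the ancestor-prefix characterisation: c occurs among B's prefixes of n
-- iff A's test (n == c or n startswith c + "/") succeeds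
theorem mem_prefixes_iff (n c : List Char) :
    (c ∈ (n :: ((PySem.List.enumerate n 0).filter (fun p => p.2 == '/')).map
          (fun p => PySem.List.slice n none (some p.1)))) ↔
      (n = c ∨ PySem.Chars.startswith n (c ++ ['/']) = true) := by
  simp only [List.mem_cons, List.mem_map, List.mem_filter, PySem.List.mem_enumerate_iff]
  constructor
  · rintro (rfl | ⟨⟨i, ch⟩, ⟨⟨k, hk, hpair⟩, hch⟩, rfl⟩)
    · exact Or.inl rfl
    · right
      obtain ⟨rfl, rfl⟩ := Prod.mk.injEq .. ▸ hpair
      simp only [beq_iff_eq] at hch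
      have hz : ((0 : Int) + k) = (k : Int) := by omega
      rw [hz, PySem.List.slice_to_natCast]
      rw [PySem.Chars.startswith_iff]
      have : n.take k ++ ['/'] = n.take (k + 1) := by
        rw [List.take_add_one, List.getElem?_eq_getElem hk, hch]
        rfl
      rw [this]
      exact List.take_prefix _ _
  · rintro (rfl | hsw)
    · exact Or.inl rfl
    · right
      rw [PySem.Chars.startswith_iff] at hsw
      obtain ⟨t, ht⟩ := hsw
      rw [List.append_assoc] at ht
      simp only [List.singleton_append] at ht
      have hk : c.length < n.length := by
        have := congrArg List.length ht
        simp at this; omega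
      have hget : n[c.length] = '/' := by
        have : n[c.length]'hk = (c ++ '/' :: t)[c.length]'(by simp) := by
          congr 1; exact ht.symm
        rw [this, List.getElem_append_right (by omega)]
        simp
      refine ⟨(((0 : Int) + c.length), '/'), ⟨⟨c.length, hk, by rw [hget]⟩, by simp⟩, ?_⟩
      have hz : ((0 : Int) + c.length) = (c.length : Int) := by omega
      rw [hz, PySem.List.slice_to_natCast]
      rw [← ht]
      simp

-- ===== VERDICT (by name: the statement is the Claim_ definition above) =====
theorem is_within_scope_py_spec : Claim_equal_is_within_scope_py := by
  unfold Claim_equal_is_within_scope_py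
  intro path allowed_roots _
  unfold Spec_is_within_scope_py is_within_scope_py is_within_scope_py_alt
  by_cases h : (PySem.Chars.replace (PySem.Chars.strip path.toList) ['\\'] ['/']) = []
  · simp [h]
  · simp only [h, if_false]
    rw [pvALoop_eq_any, pvBLoop_eq_any, Bool.eq_iff_iff]
    simp only [List.any_eq_true, Bool.and_eq_true, Bool.or_eq_true,
      beq_iff_eq, beq_eq_false_iff_ne, ne_eq, PySem.Set.contains_iff, PySem.Set.mem_ofList,
      List.mem_filter, List.mem_map, Bool.not_eq_eq_eq_not, Bool.not_true, List.isEmpty_eq_false_iff]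
    constructor
    · rintro ⟨r, hr, hne, hcase⟩
      refine ⟨pvCleanRoot r, ?_, ⟨⟨r, hr, rfl⟩, hne⟩⟩
      exact (mem_prefixes_iff _ _).mpr (by tauto)
    · rintro ⟨p, hp, ⟨⟨r, hr, rfl⟩, hne⟩⟩
      refine ⟨r, hr, hne, ?_⟩
      have := (mem_prefixes_iff _ _).mp hp
      tauto
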